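-- pv_equiv track=rewrite | github.com/kasheen8/TPR | math_module_lab2.py | set_of_majorant
-- ===== SOURCE A (Python) =====
-- def set_of_majorant(matrix): #возвращает множество мажорант
--     size = len(matrix)
--     array_of_majorant = []
--     for j in range(size):
--         Majorant = True
--         for i in range(size):
--             if matrix[i][j] == 1:
--                 Majorant = False
--         if Majorant:
--             array_of_majorant.append(j+1)
--     return array_of_majorant
-- ===== SOURCE B (Python) =====
-- def set_of_majorant(matrix):
--     size = len(matrix)
--     seen = set()
--     for i in range(size):
--         for j in range(size):
--             if matrix[i][j] == 1:
--                 seen.add(j)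
--     return [j + 1 for j in range(size) if j not in seen]
-- ===== Notes on version B (the rewrite author's own statement) =====
-- stated objective: alternative
-- what changed: Replaces the per-column flag with a single row-major pass that collects the set of column indices containing a 1, then emits the missing columns by a comprehension; the loop nesting is inverted and the maintained state is a set instead of a boolean flag.
import Mathlib
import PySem

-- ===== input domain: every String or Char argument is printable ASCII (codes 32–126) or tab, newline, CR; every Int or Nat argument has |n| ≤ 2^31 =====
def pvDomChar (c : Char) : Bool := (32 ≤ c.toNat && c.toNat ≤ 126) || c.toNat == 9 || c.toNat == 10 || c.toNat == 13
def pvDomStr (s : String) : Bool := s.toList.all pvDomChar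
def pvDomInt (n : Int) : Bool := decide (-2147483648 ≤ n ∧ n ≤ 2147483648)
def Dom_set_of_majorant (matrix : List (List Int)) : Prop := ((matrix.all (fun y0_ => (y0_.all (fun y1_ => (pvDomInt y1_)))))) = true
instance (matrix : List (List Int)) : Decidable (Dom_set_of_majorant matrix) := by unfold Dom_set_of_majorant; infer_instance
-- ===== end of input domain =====

-- Alternative decomposition: B makes one row-major pass collecting the set of columns that contain
-- a 1, then lists the missing columns; same O(n^2) cost, different traversal and maintained state.
-- ===== PORT A =====
def set_of_majorant (matrix : List (List Int)) : List Int :=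
  let size : Int := matrix.length
  (PySem.List.pyRange 0 size 1).foldl (fun acc j =>
    let maj := (PySem.List.pyRange 0 size 1).foldl (fun m i =>
      if PySem.List.pyGetD (PySem.List.pyGetD matrix i []) j 0 = 1 then false else m) true
    if maj then acc ++ [j + 1] else acc) []

-- ===== PORT B =====
def set_of_majorant_alt (matrix : List (List Int)) : List Int :=
  let size : Int := matrix.length
  let seen : PySem.Set Int :=
    (PySem.List.pyRange 0 size 1).foldl (fun s i =>
      (PySem.List.pyRange 0 size 1).foldl (fun s j =>
        if PySem.List.pyGetD (PySem.List.pyGetD matrix i []) j 0 = 1 then PySem.Set.add s j else s) s)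
      PySem.Set.empty
  ((PySem.List.pyRange 0 size 1).filter (fun j => !(PySem.Set.contains seen j))).map (fun j => j + 1)

-- ===== PRECONDITION & SPEC =====
-- Pre_ excludes ragged matrices (some row shorter than the matrix), on which both A and B raise IndexError.
def Pre_set_of_majorant (matrix : List (List Int)) : Prop :=
  ∀ row ∈ matrix, matrix.length ≤ row.length
instance (matrix : List (List Int)) : Decidable (Pre_set_of_majorant matrix) := by
  unfold Pre_set_of_majorant; infer_instance
def pvWitness_set_of_majorant : List (List Int) := [[0, 1], [2, 0]]
def Spec_set_of_majorant (matrix : List (List Int)) (out : List Int) : Prop := out = set_of_majorant_alt matrix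
instance (matrix : List (List Int)) (out : List Int) : Decidable (Spec_set_of_majorant matrix out) := by unfold Spec_set_of_majorant; infer_instance

-- ===== CLAIM (what is proved, stated in full; the proofs are below) =====
def Claim_equal_set_of_majorant : Prop := ∀ (matrix : List (List Int)), Dom_set_of_majorant matrix → Pre_set_of_majorant matrix → Spec_set_of_majorant matrix (set_of_majorant matrix)

-- ===== LEMMAS AND PROOFS =====
theorem flag_foldl_false (p : Int → Prop) [DecidablePred p] (l : List Int) :
    l.foldl (fun m i => if p i then false else m) false = false := by
  induction l with
  | nil => rfl
  | cons x xs ih => rw [List.foldl_cons]; split_ifs <;> exact ih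

theorem flag_foldl (p : Int → Prop) [DecidablePred p] (l : List Int) (b : Bool) :
    l.foldl (fun m i => if p i then false else m) b = (b && !(l.any fun i => decide (p i))) := by
  induction l generalizing b with
  | nil => simp
  | cons x xs ih =>
    rw [List.foldl_cons]
    by_cases h : p x
    · rw [if_pos h, flag_foldl_false p xs]
      simp [h]
    · rw [if_neg h, ih]
      simp [h]

theorem seen_foldl_inner (cell : Int → Prop) [DecidablePred cell] (l : List Int) (s : PySem.Set Int) (x : Int) :
    x ∈ l.foldl (fun s j => if cell j then PySem.Set.add s j else s) s ↔
      x ∈ s ∨ (x ∈ l ∧ cell x) := by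
  induction l generalizing s with
  | nil => simp
  | cons y ys ih =>
    by_cases h : cell y
    · simp only [List.foldl_cons, h, if_pos]
      rw [ih]
      simp only [PySem.Set.mem_add, List.mem_cons]
      constructor
      · rintro ((hs | rfl) | ⟨hm, hc⟩)
        · exact Or.inl hs
        · exact Or.inr ⟨Or.inl rfl, h⟩
        · exact Or.inr ⟨Or.inr hm, hc⟩
      · rintro (hs | ⟨(rfl | hm), hc⟩)
        · exact Or.inl (Or.inl hs)
        · exact Or.inl (Or.inr rfl)
        · exact Or.inr ⟨hm, hc⟩
    · simp only [List.foldl_cons, h, if_neg, not_false_iff]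
      rw [ih]
      simp only [List.mem_cons]
      constructor
      · rintro (hs | ⟨hm, hc⟩)
        · exact Or.inl hs
        · exact Or.inr ⟨Or.inr hm, hc⟩
      · rintro (hs | ⟨(rfl | hm), hc⟩)
        · exact Or.inl hs
        · exact absurd hc (by simp [h])
        · exact Or.inr ⟨hm, hc⟩

theorem seen_foldl_outer (cell : Int → Int → Prop) [inst : ∀ i j, Decidable (cell i j)] (rows : List Int) (cols : List Int)
    (s : PySem.Set Int) (x : Int) :
    x ∈ rows.foldl (fun s i =>
        cols.foldl (fun s j => if cell i j then PySem.Set.add s j else s) s) s ↔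
      x ∈ s ∨ ∃ i ∈ rows, x ∈ cols ∧ cell i x := by
  induction rows generalizing s with
  | nil => simp
  | cons r rs ih =>
    simp only [List.foldl_cons]
    rw [ih, seen_foldl_inner]
    constructor
    · rintro ((hs | ⟨hm, hc⟩) | ⟨i, hi, hm, hc⟩)
      · exact Or.inl hs
      · exact Or.inr ⟨r, List.mem_cons_self .., hm, hc⟩
      · exact Or.inr ⟨i, List.mem_cons_of_mem _ hi, hm, hc⟩
    · rintro (hs | ⟨i, hi, hm, hc⟩)
      · exact Or.inl (Or.inl hs)
      · rcases List.mem_cons.mp hi with rfl | hi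
        · exact Or.inl (Or.inr ⟨hm, hc⟩)
        · exact Or.inr ⟨i, hi, hm, hc⟩

-- ===== VERDICT (by name: the statement is the Claim_ definition above) =====
theorem set_of_majorant_spec : Claim_equal_set_of_majorant := by
  intro matrix _ _
  unfold Spec_set_of_majorant set_of_majorant set_of_majorant_alt
  simp only
  rw [PySem.List.foldl_append_if]
  simp only [List.nil_append]
  congr 1
  apply List.filter_congr
  intro j hj
  rw [flag_foldl (fun i => PySem.List.pyGetD (PySem.List.pyGetD matrix i []) j 0 = 1)]
  simp only [Bool.true_and]
  congr 1
  rw [Bool.eq_iff_iff, List.any_eq_true]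
  simp only [decide_eq_true_eq, PySem.Set.contains, List.contains_iff_mem]
  rw [seen_foldl_outer (fun i j => PySem.List.pyGetD (PySem.List.pyGetD matrix i []) j 0 = 1)]
  simp [hj]
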